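-- pv_equiv track=rewrite | github.com/mnschmit/unsupervised-graph-text-conversion | src/data/format_webnlg.py | preprocess_relation
-- ===== SOURCE A (Python) =====
-- def preprocess_relation(rel: str, token_sep=' ') -> str:
--     res_buffer = []
--     mid_word = False
--     for char in rel:
--         if char == '_':
--             res_buffer.append(token_sep)
--             mid_word = False
--         elif char.isupper() and mid_word:
--             res_buffer.append(token_sep)
--             res_buffer.append(char.lower())
--             mid_word = False
--         else:
--             res_buffer.append(char)
--             mid_word = char.islower()
--     return ''.join(res_buffer)
-- ===== SOURCE B (Python) =====
-- def preprocess_relation(rel: str, token_sep=' ') -> str: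
--     # Staged tokenization instead of A's stateful character scan:
--     # (1) compute all token-boundary indices, (2) slice rel into pieces,
--     # (3) classify each piece from its neighbours, (4) join.
--     n = len(rel)
--     cuts = [i for i in range(1, n)
--             if rel[i] == '_' or rel[i - 1] == '_'
--             or (rel[i - 1].islower() and rel[i].isupper())]
--     bounds = [0] + cuts + [n]
--     pieces = [rel[a:b] for a, b in zip(bounds, bounds[1:])]
--     out = [token_sep if pieces[0] == '_' else pieces[0]]
--     for prev, p in zip(pieces, pieces[1:]):
--         if p == '_':
--             out.append(token_sep)
--         elif prev[-1].islower() and p[0].isupper():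
--             out.append(token_sep + p[0].lower() + p[1:])
--         else:
--             out.append(p)
--     return ''.join(out)
-- ===== Notes on version B (the rewrite author's own statement) =====
-- stated objective: alternative
-- what changed: Replaces A's stateful character scan (mid_word flag, char-by-char emission) by a staged tokenizer: compute all token-boundary indices, slice the string into pieces between consecutive bounds, classify each piece from its neighbouring pieces, and join.
import Mathlib
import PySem

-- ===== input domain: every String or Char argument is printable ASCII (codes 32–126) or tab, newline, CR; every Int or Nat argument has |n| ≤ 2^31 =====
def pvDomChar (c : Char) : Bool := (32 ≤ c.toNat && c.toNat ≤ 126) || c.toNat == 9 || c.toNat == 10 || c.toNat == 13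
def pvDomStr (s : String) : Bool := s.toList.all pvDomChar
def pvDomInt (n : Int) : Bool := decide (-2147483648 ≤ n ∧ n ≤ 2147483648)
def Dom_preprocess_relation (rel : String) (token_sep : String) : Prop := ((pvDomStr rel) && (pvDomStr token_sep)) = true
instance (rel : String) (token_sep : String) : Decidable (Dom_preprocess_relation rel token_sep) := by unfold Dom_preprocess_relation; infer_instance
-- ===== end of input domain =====

-- B replaces A's stateful character scan by a staged tokenizer (boundary indices,
-- slices, per-piece classification, join); objective: alternative, same O(n) cost.

-- ===== PORT A =====
def pvStepA (token_sep : String) (st : List String × Bool) (c : Char) : List String × Bool :=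
  if c = '_' then (st.1 ++ [token_sep], false)
  else if PySem.Chars.isupper c && st.2 then
    (st.1 ++ [token_sep, String.ofList [PySem.Chars.lowerChar c]], false)
  else (st.1 ++ [String.ofList [c]], PySem.Chars.islower c)

def preprocess_relation (rel : String) (token_sep : String) : String :=
  PySem.Str.join "" (rel.toList.foldl (pvStepA token_sep) ([], false)).1

-- ===== PORT B =====
-- 'rel[i] == "_" or rel[i-1] == "_" or (rel[i-1].islower() and rel[i].isupper())';
-- indices i and i-1 are always in range (1 ≤ i < len), so pyGetD's default is never used
def pvCutPred (w : List Char) (i : Int) : Bool :=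
  (PySem.List.pyGetD w i ' ' == '_') || (PySem.List.pyGetD w (i - 1) ' ' == '_') ||
    (PySem.Chars.islower (PySem.List.pyGetD w (i - 1) ' ') &&
      PySem.Chars.isupper (PySem.List.pyGetD w i ' '))

def pvCuts (w : List Char) : List Int :=
  (PySem.List.pyRange 1 (PySem.List.len w) 1).filter (pvCutPred w)

def pvBounds (w : List Char) : List Int := [(0 : Int)] ++ pvCuts w ++ [PySem.List.len w]

def pvPieces (w : List Char) : List (List Char) :=
  ((pvBounds w).zip (PySem.List.slice (pvBounds w) (some 1) none)).map
    (fun ab => PySem.List.slice w (some ab.1) (some ab.2))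

-- 'token_sep if pieces[0] == "_" else pieces[0]' (pieces is never empty)
def pvFirstOut (ts : List Char) (pieces : List (List Char)) : List Char :=
  if pieces.headD [] == ['_'] then ts else pieces.headD []

-- the loop body: prev[-1] / p[0] are in range on every pair the loop sees
def pvTransform (ts : List Char) (prev p : List Char) : List Char :=
  if p == ['_'] then ts
  else if PySem.Chars.islower (PySem.List.pyGetD prev (-1) ' ') &&
      PySem.Chars.isupper (PySem.List.pyGetD p 0 ' ') then
    ts ++ PySem.Chars.lowerChar (PySem.List.pyGetD p 0 ' ') :: PySem.List.slice p (some 1) none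
  else p

def preprocess_relation_alt (rel : String) (token_sep : String) : String :=
  let w := rel.toList
  let ts := token_sep.toList
  let pieces := pvPieces w
  let out := ((pieces.zip (PySem.List.slice pieces (some 1) none)).foldl
    (fun acc pp => acc ++ [pvTransform ts pp.1 pp.2]) [pvFirstOut ts pieces])
  String.ofList (PySem.Chars.join [] out)

-- ===== PRECONDITION & SPEC =====
def Spec_preprocess_relation (rel : String) (token_sep : String) (out : String) : Prop := out = preprocess_relation_alt rel token_sep
instance (rel : String) (token_sep : String) (out : String) : Decidable (Spec_preprocess_relation rel token_sep out) := by unfold Spec_preprocess_relation; infer_instance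

-- ===== CLAIM (what is proved, stated in full; the proofs are below) =====
def Claim_equal_preprocess_relation : Prop := ∀ (rel : String) (token_sep : String), Dom_preprocess_relation rel token_sep → Spec_preprocess_relation rel token_sep (preprocess_relation rel token_sep)

-- ===== LEMMAS AND PROOFS =====

/-- "position after p, at c, starts a new token" -/
def pvCutB (p c : Char) : Bool :=
  (c == '_') || (p == '_') || (PySem.Chars.islower p && PySem.Chars.isupper c)

/-- Recursive chunking of the string at the cut boundaries. -/
def pvChunks : List Char → List (List Char)
  | [] => []
  | [c] => [[c]]
  | c :: d :: l =>
    if pvCutB c d then [c] :: pvChunks (d :: l)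
    else (c :: (pvChunks (d :: l)).headD []) :: (pvChunks (d :: l)).tail

/-- Reference recursion: A's loop with prev-char state. -/
def pvRunR (ts : List Char) : Char → List Char → List Char
  | _, [] => []
  | p, c :: l =>
    if c = '_' then ts ++ pvRunR ts c l
    else if PySem.Chars.islower p && PySem.Chars.isupper c then
      ts ++ PySem.Chars.lowerChar c :: pvRunR ts c l
    else c :: pvRunR ts c l

def pvJ (l : List String) : List Char := (l.map String.toList).flatten

theorem pv_intercalate_nil (xs : List (List Char)) : List.intercalate [] xs = xs.flatten := by
  induction xs with
  | nil => rfl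
  | cons a t ih =>
    cases t with
    | nil => simp [List.intercalate]
    | cons b t' =>
      simp only [List.intercalate, List.intersperse, List.flatten] at *
      simpa using ih

theorem pv_join_empty (parts : List String) :
    PySem.Str.join "" parts = String.ofList (pvJ parts) := by
  simp [PySem.Str.join, PySem.Chars.join, pv_intercalate_nil, pvJ]

theorem pv_joinc_empty (parts : List (List Char)) :
    PySem.Chars.join [] parts = parts.flatten := by
  simp [PySem.Chars.join, pv_intercalate_nil]

theorem pv_not_lower_of_upper (c : Char) (h : PySem.Chars.isupper c = true) :
    PySem.Chars.islower c = false := by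
  simp only [PySem.Chars.isupper, Bool.and_eq_true, decide_eq_true_eq] at h
  have h3 : ¬ ('a' ≤ c) := fun hl => absurd (le_trans hl h.2) (by decide)
  simp [PySem.Chars.islower, h3]

/-- A's flag equals "previous char is lowercase"; A's loop is pvRunR. -/
theorem pvFoldA (ts : String) (l : List Char) (p : Char) (acc : List String) :
    pvJ (l.foldl (pvStepA ts) (acc, PySem.Chars.islower p)).1
      = pvJ acc ++ pvRunR ts.toList p l := by
  induction l generalizing p acc with
  | nil => simp [pvRunR, pvJ]
  | cons c cs ih =>
    rw [List.foldl_cons]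
    by_cases hc : c = '_'
    · subst hc
      have h1 : (false : Bool) = PySem.Chars.islower '_' := by decide
      rw [show pvStepA ts (acc, PySem.Chars.islower p) '_'
            = (acc ++ [ts], PySem.Chars.islower '_') by simp [pvStepA, ← h1]]
      rw [ih]
      simp [pvRunR, pvJ]
    · by_cases hu : (PySem.Chars.isupper c && PySem.Chars.islower p) = true
      · have hcu : PySem.Chars.isupper c = true := by
          cases h : PySem.Chars.isupper c <;> simp [h] at hu ⊢
        have hpl : PySem.Chars.islower p = true := by
          cases h : PySem.Chars.islower p <;> simp [h] at hu ⊢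
        have hflag : (false : Bool) = PySem.Chars.islower c :=
          (pv_not_lower_of_upper c hcu).symm
        rw [show pvStepA ts (acc, PySem.Chars.islower p) c
              = (acc ++ [ts, String.ofList [PySem.Chars.lowerChar c]], PySem.Chars.islower c) by
            simp [pvStepA, if_neg hc, hu, ← hflag]]
        rw [ih]
        simp [pvRunR, if_neg hc, hpl, hcu, pvJ]
      · rw [show pvStepA ts (acc, PySem.Chars.islower p) c
              = (acc ++ [String.ofList [c]], PySem.Chars.islower c) by
            simp [pvStepA, if_neg hc, hu]]
        rw [ih]
        have hu' : (PySem.Chars.islower p && PySem.Chars.isupper c) = false := by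
          rw [Bool.and_comm]; simpa using hu
        simp [pvRunR, if_neg hc, hu', pvJ]

theorem pvGetD_cons_shift (c : Char) (w : List Char) (i : Int) (dflt : Char) (h : 0 ≤ i) :
    PySem.List.pyGetD (c :: w) (i + 1) dflt = PySem.List.pyGetD w i dflt := by
  obtain ⟨k, rfl⟩ : ∃ k : Nat, i = (k : Int) := ⟨i.toNat, by omega⟩
  rw [show ((k : Int) + 1) = ((k + 1 : Nat) : Int) by push_cast; ring,
      PySem.List.pyGetD_natCast, PySem.List.pyGetD_natCast]
  simp

theorem pvCutPred_shift (c : Char) (w : List Char) (i : Int) (h1 : 1 ≤ i) :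
    pvCutPred (c :: w) (i + 1) = pvCutPred w i := by
  unfold pvCutPred
  rw [show i + 1 - 1 = (i - 1) + 1 by ring]
  rw [pvGetD_cons_shift c w i ' ' (by omega), pvGetD_cons_shift c w (i - 1) ' ' (by omega)]

theorem pvRange_shift_key (l : List Nat) :
    (l.map Nat.succ).map (fun k : Nat => (1 : Int) + (k : Int))
      = (l.map (fun k : Nat => (1 : Int) + (k : Int))).map (· + 1) := by
  induction l with
  | nil => rfl
  | cons a tl iht =>
    simp only [List.map_cons, iht]
    exact List.cons_eq_cons.mpr
      ⟨show (1 : Int) + ((a + 1 : Nat) : Int) = (1 + (a : Int)) + 1 by push_cast; ring, rfl⟩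

theorem pvRange_shift (m : Nat) :
    PySem.List.pyRange 1 ((m : Int) + 2) 1
      = (1 : Int) :: (PySem.List.pyRange 1 ((m : Int) + 1) 1).map (· + 1) := by
  have h2 : (((m : Int) + 2) - 1).toNat = m + 1 := by omega
  have h1 : (((m : Int) + 1) - 1).toNat = m := by omega
  rw [PySem.List.pyRange_one, PySem.List.pyRange_one, h1, h2, List.range_succ_eq_map,
      List.map_cons, pvRange_shift_key]
  exact List.cons_eq_cons.mpr ⟨by norm_num, rfl⟩

/-- cut-index list shift. -/
theorem pvCuts_cons₂ (c d : Char) (l : List Char) :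
    pvCuts (c :: d :: l)
      = (if pvCutB c d then [(1 : Int)] else []) ++ (pvCuts (d :: l)).map (· + 1) := by
  have hlen2 : PySem.List.len (c :: d :: l) = ((l.length : Int) + 2) := by
    simp only [PySem.List.len_eq, List.length_cons]; push_cast; ring
  have hlen1 : PySem.List.len (d :: l) = ((l.length : Int) + 1) := by
    simp only [PySem.List.len_eq, List.length_cons]; push_cast; ring
  have hpred1 : pvCutPred (c :: d :: l) 1 = pvCutB c d := by
    unfold pvCutPred pvCutB
    rw [show (1 : Int) - 1 = ((0 : Nat) : Int) by norm_num,
        show (1 : Int) = ((1 : Nat) : Int) by norm_num,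
        PySem.List.pyGetD_natCast, PySem.List.pyGetD_natCast]
    simp
  rw [pvCuts, hlen2, pvRange_shift, List.filter_cons]
  rw [List.filter_map]
  have hcongr : (PySem.List.pyRange 1 ((l.length : Int) + 1) 1).filter
        ((pvCutPred (c :: d :: l)) ∘ (· + 1))
      = (PySem.List.pyRange 1 ((l.length : Int) + 1) 1).filter (pvCutPred (d :: l)) := by
    apply List.filter_congr
    intro i hi
    have h1 : 1 ≤ i := ((PySem.List.mem_pyRange_one).1 hi).1
    simpa [Function.comp] using pvCutPred_shift c (d :: l) i h1
  rw [hcongr, hpred1, pvCuts, hlen1]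
  by_cases hcd : pvCutB c d = true <;> simp [hcd]

theorem pvPieces_nil : pvPieces [] = [[]] := by decide

theorem pvPieces_single (c : Char) : pvPieces [c] = [[c]] := rfl

/-- proof-side: the slice map over consecutive bound pairs. -/
def pvSliceMap (w : List Char) (bs : List Int) : List (List Char) :=
  (bs.zip bs.tail).map (fun ab => PySem.List.slice w (some ab.1) (some ab.2))

theorem pvSliceMap_shift (w0 : List Char) (c : Char) (X : List Int)
    (hX : ∀ x ∈ X, 0 ≤ x) :
    pvSliceMap (c :: w0) (X.map (· + 1)) = pvSliceMap w0 X := by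
  unfold pvSliceMap
  rw [show (X.map (· + 1)).tail = X.tail.map (· + 1) by cases X <;> simp]
  rw [List.zip_map]
  rw [List.map_map]
  apply List.map_congr_left
  intro ab hab
  obtain ⟨ha, hb⟩ := List.of_mem_zip hab
  have ha' : 0 ≤ ab.1 := hX _ ha
  have hb' : 0 ≤ ab.2 := hX _ (List.tail_subset X hb)
  simp only [Prod.map, Function.comp]
  rw [PySem.List.slice_toNat _ (by omega) (by omega),
      PySem.List.slice_toNat _ ha' hb']
  have e2 : (ab.2 + 1).toNat - (ab.1 + 1).toNat = ab.2.toNat - ab.1.toNat := by omega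
  have e1 : (ab.1 + 1).toNat = ab.1.toNat + 1 := by omega
  rw [e2, e1, List.drop_succ_cons]

theorem pvSliceMap_cons₂ (w : List Char) (a b : Int) (r : List Int) :
    pvSliceMap w (a :: b :: r)
      = PySem.List.slice w (some a) (some b) :: pvSliceMap w (b :: r) := by
  simp [pvSliceMap]

theorem pvSlice_zero_succ (w0 : List Char) (c : Char) (b : Int) (hb : 0 ≤ b) :
    PySem.List.slice (c :: w0) (some 0) (some (b + 1))
      = c :: PySem.List.slice w0 (some 0) (some b) := by
  rw [PySem.List.slice_toNat _ (by omega) (by omega),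
      PySem.List.slice_toNat _ le_rfl hb]
  have e1 : (b + 1).toNat = b.toNat + 1 := by omega
  simp [e1]

theorem pvCuts_nonneg (w : List Char) : ∀ x ∈ pvCuts w, 0 ≤ x := by
  intro x hx
  have := List.mem_of_mem_filter hx
  have := (PySem.List.mem_pyRange_one).1 this
  omega

theorem pvPieces_eq_sliceMap (w : List Char) :
    pvPieces w = pvSliceMap w (pvBounds w) := by
  unfold pvPieces pvSliceMap
  rw [PySem.List.slice_from_one]

theorem pvLen_cons (c : Char) (w : List Char) :
    PySem.List.len (c :: w) = PySem.List.len w + 1 := by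
  simp [PySem.List.len_eq]

theorem pvPieces_eq_chunks : ∀ (l : List Char) (c : Char),
    pvPieces (c :: l) = pvChunks (c :: l) := by
  intro l
  induction l with
  | nil => intro c; rw [pvPieces_single]; rfl
  | cons d l' ih =>
    intro c
    have hT : ∀ x ∈ pvCuts (d :: l') ++ [PySem.List.len (d :: l')], 0 ≤ x := by
      intro x hx
      rcases List.mem_append.1 hx with h | h
      · exact pvCuts_nonneg _ x h
      · simp [PySem.List.len_eq] at h; subst h; omega
    have hB' : pvBounds (d :: l') = 0 :: (pvCuts (d :: l') ++ [PySem.List.len (d :: l')]) := by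
      simp [pvBounds]
    rw [pvPieces_eq_sliceMap]
    by_cases hcd : pvCutB c d = true
    · have hb : pvBounds (c :: d :: l')
          = 0 :: ((0 :: (pvCuts (d :: l') ++ [PySem.List.len (d :: l')])).map (· + 1)) := by
        rw [pvBounds, pvCuts_cons₂, if_pos hcd, pvLen_cons]
        simp
      rw [hb]
      rw [show ((0 : Int) :: (pvCuts (d :: l') ++ [PySem.List.len (d :: l')])).map (· + 1)
            = 1 :: (pvCuts (d :: l') ++ [PySem.List.len (d :: l')]).map (· + 1) by simp]
      rw [pvSliceMap_cons₂]
      rw [show PySem.List.slice (c :: d :: l') (some 0) (some 1) = [c] from by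
        rw [PySem.List.slice_toNat _ (by norm_num) (by norm_num)]; rfl]
      rw [show ((1 : Int) :: (pvCuts (d :: l') ++ [PySem.List.len (d :: l')]).map (· + 1))
            = ((0 :: (pvCuts (d :: l') ++ [PySem.List.len (d :: l')])).map (· + 1)) by simp]
      rw [pvSliceMap_shift _ _ _ (by
        intro x hx
        rcases List.mem_cons.1 hx with h | h
        · omega
        · exact hT x h)]
      rw [← hB', ← pvPieces_eq_sliceMap, ih d]
      simp [pvChunks, hcd]
    · have hcd' : pvCutB c d = false := by simpa using hcd
      obtain ⟨t0, T', hTeq⟩ := List.exists_cons_of_ne_nil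
        (show pvCuts (d :: l') ++ [PySem.List.len (d :: l')] ≠ [] by simp)
      have ht0 : 0 ≤ t0 := hT t0 (by rw [hTeq]; exact List.mem_cons_self)
      have hT' : ∀ x ∈ t0 :: T', 0 ≤ x := by rw [← hTeq]; exact hT
      have hb : pvBounds (c :: d :: l')
          = 0 :: ((pvCuts (d :: l') ++ [PySem.List.len (d :: l')]).map (· + 1)) := by
        rw [pvBounds, pvCuts_cons₂, if_neg (by simp [hcd']), pvLen_cons]
        simp
      rw [hb, hTeq, List.map_cons, pvSliceMap_cons₂]
      rw [pvSlice_zero_succ _ _ _ ht0]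
      rw [show ((t0 + 1) :: T'.map (· + 1)) = ((t0 :: T').map (· + 1)) by simp]
      rw [pvSliceMap_shift _ _ _ hT']
      have hpieces : pvChunks (d :: l')
          = PySem.List.slice (d :: l') (some 0) (some t0) :: pvSliceMap (d :: l') (t0 :: T') := by
        rw [← ih d, pvPieces_eq_sliceMap, hB', hTeq, pvSliceMap_cons₂]
      rw [show pvChunks (c :: d :: l')
            = (c :: (pvChunks (d :: l')).headD []) :: (pvChunks (d :: l')).tail from by
          simp [pvChunks, hcd']]
      rw [hpieces]
      simp

theorem pvChunks_head : ∀ (l : List Char) (c : Char),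
    ∃ r t, pvChunks (c :: l) = (c :: r) :: t := by
  intro l
  induction l with
  | nil => intro c; exact ⟨[], [], rfl⟩
  | cons d l' ih =>
    intro c
    by_cases hcut : pvCutB c d = true
    · exact ⟨[], pvChunks (d :: l'), by simp [pvChunks, hcut]⟩
    · obtain ⟨r, t, h⟩ := ih d
      exact ⟨d :: r, t, by simp [pvChunks, hcut, h]⟩

theorem pvChunks_underscore (l' : List Char) :
    ∃ t, pvChunks ('_' :: l') = ['_'] :: t := by
  cases l' with
  | nil => exact ⟨[], rfl⟩
  | cons e l'' =>
    exact ⟨pvChunks (e :: l''), by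
      simp [pvChunks, show pvCutB '_' e = true from by simp [pvCutB]]⟩

theorem pvRunR_prev (ts : List Char) (p q d : Char) (l : List Char)
    (h : (PySem.Chars.islower p && PySem.Chars.isupper d)
        = (PySem.Chars.islower q && PySem.Chars.isupper d)) :
    pvRunR ts p (d :: l) = pvRunR ts q (d :: l) := by
  simp only [pvRunR]
  rw [h]

theorem pvTransform_cons (ts : List Char) (c : Char) (h x : List Char) (hh : h ≠ []) :
    pvTransform ts (c :: h) x = pvTransform ts h x := by
  have hlast : PySem.List.pyGetD (c :: h) (-1) ' ' = PySem.List.pyGetD h (-1) ' ' := by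
    rw [PySem.List.pyGetD_neg_one (c :: h) ' ' (List.cons_ne_nil c h),
        PySem.List.pyGetD_neg_one h ' ' hh, List.getLast_cons hh]
  simp only [pvTransform, hlast]

theorem pvTransform_underscore (ts : List Char) (x : List Char) :
    pvTransform ts ['_'] x = if x == ['_'] then ts else x := by
  simp [pvTransform,
    show PySem.Chars.islower (PySem.List.pyGetD ['_'] (-1) ' ') = false from by decide]

theorem pvFirstOut_cons (ts : List Char) (a : List Char) (t : List (List Char)) :
    pvFirstOut ts (a :: t) = if a == ['_'] then ts else a := rfl

/-- Main correspondence: B's staged pipeline equals the reference recursion. -/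
theorem pvMain : ∀ (l : List Char) (c : Char) (ts : List Char),
    pvFirstOut ts (pvChunks (c :: l))
        ++ (((pvChunks (c :: l)).zip (pvChunks (c :: l)).tail).map
            (fun pp => pvTransform ts pp.1 pp.2)).flatten
      = pvRunR ts '_' (c :: l) := by
  intro l
  induction l with
  | nil =>
    intro c ts
    by_cases hc : c = '_'
    · subst hc; simp [pvChunks, pvFirstOut, pvRunR]
    · simp [pvChunks, pvFirstOut, pvRunR, hc, beq_iff_eq,
        show PySem.Chars.islower '_' = false from rfl]
  | cons d l' ih =>
    intro c ts
    obtain ⟨r, t, hch⟩ := pvChunks_head l' d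
    by_cases hcut : pvCutB c d = true
    · have hchunks : pvChunks (c :: d :: l') = [c] :: pvChunks (d :: l') := by
        simp [pvChunks, hcut]
      rw [hchunks, hch]
      simp only [List.tail_cons, List.zip_cons_cons, List.map_cons, List.flatten_cons]
      have ihx := ih d ts
      rw [hch] at ihx
      simp only [List.tail_cons, List.zip_cons_cons, List.map_cons, List.flatten_cons] at ihx
      by_cases hc : c = '_'
      · subst hc
        rw [pvFirstOut_cons, if_pos (show ((['_'] : List Char) == ['_']) = true from by decide),
            pvTransform_underscore]
        rw [pvFirstOut_cons] at ihx
        rw [show pvRunR ts '_' ('_' :: d :: l') = ts ++ pvRunR ts '_' (d :: l') from by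
          simp [pvRunR]]
        rw [← ihx]
      · by_cases hd : d = '_'
        · subst hd
          obtain ⟨t', ht'⟩ := pvChunks_underscore l'
          rw [hch] at ht'
          have hr : r = [] := by
            obtain ⟨h1, -⟩ := List.cons_eq_cons.mp ht'
            exact (List.cons_eq_cons.mp h1).2
          subst hr
          rw [pvFirstOut_cons, if_neg (by simp [hc]),
              show pvTransform ts [c] ['_'] = ts from by simp [pvTransform]]
          rw [pvFirstOut_cons, if_pos (by simp)] at ihx
          have hrun : pvRunR ts '_' ('_' :: l') = ts ++ pvRunR ts '_' l' := by simp [pvRunR]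
          rw [hrun] at ihx
          have hrest := List.append_cancel_left ihx
          rw [show pvRunR ts '_' (c :: '_' :: l')
                = c :: (ts ++ pvRunR ts '_' l') from by
            simp [pvRunR, hc, show PySem.Chars.islower '_' = false from rfl]]
          rw [← hrest]
          simp
        · have hcam : PySem.Chars.islower c = true ∧ PySem.Chars.isupper d = true := by
            have := hcut
            simp only [pvCutB, beq_iff_eq, hc, hd, Bool.or_eq_true, decide_eq_true_eq,
              Bool.and_eq_true] at this
            tauto
          rw [pvFirstOut_cons, if_neg (by simp [hc])]
          rw [show pvTransform ts [c] (d :: r)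
                = ts ++ PySem.Chars.lowerChar d :: r from by
            rw [pvTransform, if_neg (by simp [beq_iff_eq, hd]),
                show PySem.List.pyGetD [c] (-1) ' ' = c from rfl]
            simp [hcam.1, hcam.2, PySem.List.slice_from_one]]
          rw [pvFirstOut_cons, if_neg (by simp [beq_iff_eq, hd])] at ihx
          have hrund : pvRunR ts '_' (d :: l') = d :: pvRunR ts d l' := by
            simp [pvRunR, hd, show PySem.Chars.islower '_' = false from rfl]
          rw [hrund] at ihx
          have hrest : r ++ ((((d :: r) :: t).zip t).map
              (fun pp => pvTransform ts pp.1 pp.2)).flatten = pvRunR ts d l' := by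
            have h2 := ihx
            rw [List.cons_append] at h2
            exact (List.cons_eq_cons.mp h2).2
          rw [show pvRunR ts '_' (c :: d :: l')
                = c :: (ts ++ PySem.Chars.lowerChar d :: pvRunR ts d l') from by
            simp [pvRunR, hc, hd, hcam.1, hcam.2,
              show PySem.Chars.islower '_' = false from rfl]]
          rw [← hrest]
          simp
    · have hcd' : pvCutB c d = false := by simpa using hcut
      have hc : ¬ c = '_' := by
        intro h; subst h; simp [pvCutB] at hcd'
      have hd : ¬ d = '_' := by
        intro h; subst h; simp [pvCutB] at hcd'
      have hcam : (PySem.Chars.islower c && PySem.Chars.isupper d) = false := by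
        simp only [pvCutB, beq_iff_eq, hc, hd, Bool.or_eq_false_iff, decide_eq_false_iff_not] at hcd'
        tauto
      have hchunks : pvChunks (c :: d :: l') = (c :: d :: r) :: t := by
        simp [pvChunks, hcd', hch]
      have ihx := ih d ts
      rw [hch] at ihx
      rw [pvFirstOut_cons, if_neg (by simp [beq_iff_eq, hd])] at ihx
      have hprev : pvRunR ts c (d :: l') = pvRunR ts '_' (d :: l') :=
        pvRunR_prev ts c '_' d l' (by
          rw [hcam, show PySem.Chars.islower '_' = false from rfl, Bool.false_and])
      have hstep : pvRunR ts '_' (c :: d :: l') = c :: pvRunR ts c (d :: l') := by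
        simp [pvRunR, hc, show PySem.Chars.islower '_' = false from rfl]
      rw [hchunks, hstep, hprev, ← ihx]
      rw [pvFirstOut_cons, if_neg (by simp [beq_iff_eq, hc])]
      cases t with
      | nil => simp
      | cons x t' =>
        simp only [List.tail_cons, List.zip_cons_cons, List.map_cons, List.flatten_cons]
        rw [pvTransform_cons ts c (d :: r) x (List.cons_ne_nil d r)]
        simp

theorem pvAltList (w ts : List Char) :
    PySem.Chars.join [] (((pvPieces w).zip (PySem.List.slice (pvPieces w) (some 1) none)).foldl
        (fun acc pp => acc ++ [pvTransform ts pp.1 pp.2]) [pvFirstOut ts (pvPieces w)])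
      = pvRunR ts '_' w := by
  rw [PySem.List.slice_from_one, PySem.List.foldl_append_singleton_eq_map, pv_joinc_empty]
  cases w with
  | nil => simp [pvPieces_nil, pvFirstOut, pvRunR]
  | cons c l =>
    rw [pvPieces_eq_chunks l c, List.singleton_append, List.flatten_cons]
    exact pvMain l c ts

-- ===== VERDICT (by name: the statement is the Claim_ definition above) =====
theorem preprocess_relation_spec : Claim_equal_preprocess_relation := by
  intro rel token_sep _
  unfold Spec_preprocess_relation preprocess_relation preprocess_relation_alt
  rw [pv_join_empty]
  have h := pvFoldA token_sep rel.toList '_' []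
  rw [show PySem.Chars.islower '_' = false from rfl] at h
  rw [show pvJ ([] : List String) = [] from rfl, List.nil_append] at h
  rw [h]
  exact congrArg String.ofList (pvAltList rel.toList token_sep.toList).symm
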